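-- pv_equiv track=rewrite | github.com/huikinglam02gmail/Leetcode_solutions | 2086.minimum-number-of-food-buckets-to-feed-the-hamsters.py | minimumBuckets
-- ===== SOURCE A (Python) =====
-- def minimumBuckets(hamsters: str) -> int:
--     last = -2
--     result = 0
--     n = len(hamsters)
--     for i, hamster in enumerate(hamsters):
--         if hamster == ".": continue
--         if i >= 1 and last == i - 1: continue
--         if i < n - 1 and hamsters[i + 1] == ".":
--             result += 1
--             last = i + 1
--         elif i >= 1 and hamsters[i - 1] == ".":
--             result += 1
--             last = i - 1
--         else:
--             return -1
--     return result
-- ===== SOURCE B (Python) =====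
-- def minimumBuckets(hamsters: str) -> int:
--     n = len(hamsters)
--     total = 0
--     for i, c in enumerate(hamsters):
--         if c != ".":
--             if not ((i > 0 and hamsters[i - 1] == ".") or (i < n - 1 and hamsters[i + 1] == ".")):
--                 return -1
--             total += 1
--     pairs = 0
--     i = 0
--     while i + 2 < n:
--         if hamsters[i] != "." and hamsters[i + 1] == "." and hamsters[i + 2] != ".":
--             pairs += 1
--             i += 3
--         else:
--             i += 1
--     return total - pairs
-- ===== Notes on version B (the rewrite author's own statement) =====
-- stated objective: alternative
-- what changed: B replaces A's single greedy bucket-placement scan with a mutable sentinel index by arithmetic: one pass counts non-dot hamsters (returning -1 if one has no adjacent dot), a second pass greedily counts non-overlapping hamster-dot-hamster triples that share one bucket, and the answer is the hamster count minus the triple count.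
import Mathlib
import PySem

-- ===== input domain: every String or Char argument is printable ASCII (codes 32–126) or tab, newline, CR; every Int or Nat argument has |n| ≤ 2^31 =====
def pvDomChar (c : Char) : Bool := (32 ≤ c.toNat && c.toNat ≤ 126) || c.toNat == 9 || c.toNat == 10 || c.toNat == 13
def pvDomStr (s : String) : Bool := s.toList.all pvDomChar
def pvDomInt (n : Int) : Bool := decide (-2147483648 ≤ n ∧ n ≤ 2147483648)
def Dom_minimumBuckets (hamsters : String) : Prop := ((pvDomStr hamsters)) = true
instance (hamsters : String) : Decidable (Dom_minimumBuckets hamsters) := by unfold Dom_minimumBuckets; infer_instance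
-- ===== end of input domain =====

-- B counts hamsters and subtracts greedily matched non-overlapping 'H.H' patterns instead of
-- simulating A's bucket placement with a 'last' sentinel; same O(n) cost, different decomposition.

-- ===== PORT A =====
-- the for-loop of A over enumerate(hamsters), state (last, result); early 'return -1' is the -1 branch
def pvAGo (s : List Char) (n : Int) : List (Int × Char) → Int → Int → Int
  | [], _, result => result
  | (i, c) :: rest, last, result =>
    if c = '.' then pvAGo s n rest last result
    else if 1 ≤ i ∧ last = i - 1 then pvAGo s n rest last result
    else if i < n - 1 ∧ PySem.List.pyGet? s (i + 1) = some '.' then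
      pvAGo s n rest (i + 1) (result + 1)
    else if 1 ≤ i ∧ PySem.List.pyGet? s (i - 1) = some '.' then
      pvAGo s n rest (i - 1) (result + 1)
    else -1

def minimumBuckets (hamsters : String) : Int :=
  pvAGo hamsters.toList (hamsters.toList.length : Int) (PySem.List.enumerate hamsters.toList 0) (-2) 0

-- ===== PORT B =====
-- first pass of B: count non-dot chars; none = the early 'return -1' (a hamster with no adjacent dot)
def pvBCount (s : List Char) (n : Int) : List (Int × Char) → Int → Option Int
  | [], total => some total
  | (i, c) :: rest, total =>
    if c ≠ '.' then
      if ¬ ((0 < i ∧ PySem.List.pyGet? s (i - 1) = some '.') ∨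
            (i < n - 1 ∧ PySem.List.pyGet? s (i + 1) = some '.')) then none
      else pvBCount s n rest (total + 1)
    else pvBCount s n rest total

-- second pass of B: the while loop scanning for non-overlapping 'H.H' patterns
def pvBPairs (s : List Char) (i : Nat) (pairs : Int) : Int :=
  if h : i + 2 < s.length then
    if s[i]'(by omega) ≠ '.' ∧ s[i+1]'(by omega) = '.' ∧ s[i+2]'h ≠ '.' then
      pvBPairs s (i + 3) (pairs + 1)
    else pvBPairs s (i + 1) pairs
  else pairs
termination_by s.length - i

def minimumBuckets_alt (hamsters : String) : Int :=
  match pvBCount hamsters.toList (hamsters.toList.length : Int)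
      (PySem.List.enumerate hamsters.toList 0) 0 with
  | none => -1
  | some total => total - pvBPairs hamsters.toList 0 0

-- ===== PRECONDITION & SPEC =====
def Spec_minimumBuckets (hamsters : String) (out : Int) : Prop := out = minimumBuckets_alt hamsters
instance (hamsters : String) (out : Int) : Decidable (Spec_minimumBuckets hamsters out) := by unfold Spec_minimumBuckets; infer_instance

-- ===== CLAIM (what is proved, stated in full; the proofs are below) =====
def Claim_equal_minimumBuckets : Prop := ∀ (hamsters : String), Dom_minimumBuckets hamsters → Spec_minimumBuckets hamsters (minimumBuckets hamsters)

-- ===== LEMMAS AND PROOFS =====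

-- '1 + v' propagating the -1 error sentinel
def pvComb (v : Int) : Int := if v = -1 then -1 else v + 1
-- 'result + v' propagating the -1 error sentinel
def pvAcc (result v : Int) : Int := if v = -1 then -1 else result + v

-- canonical recursive characterization: b = 'the char left of the suffix is a free dot'
def pvF (b : Bool) : List Char → Int
  | [] => 0
  | c :: t =>
    if c = '.' then pvF true t
    else
      match t with
      | d :: t' =>
        if d = '.' then
          match t' with
          | e :: t'' => if e = '.' then pvComb (pvF true t'') else pvComb (pvF false t'')
          | [] => 1
        else if b then pvComb (pvF false (d :: t')) else -1
      | [] => if b then 1 else -1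

def pvCnt : List Char → Int
  | [] => 0
  | c :: t => (if c = '.' then 0 else 1) + pvCnt t

def pvPrs : List Char → Int
  | c :: d :: e :: t => if c ≠ '.' ∧ d = '.' ∧ e ≠ '.' then 1 + pvPrs t else pvPrs (d :: e :: t)
  | _ => 0

def pvFeas (b : Bool) : List Char → Bool
  | [] => true
  | c :: t => if c = '.' then pvFeas true t else ((b || t.head? = some '.') && pvFeas false t)

lemma pvF_ge (b : Bool) (t : List Char) : -1 ≤ pvF b t := by
  fun_induction pvF b t <;> simp_all [pvComb] <;> split <;> omega

lemma pvLookR (pre t : List Char) (k : Nat) :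
    PySem.List.pyGet? (pre ++ t) ((pre.length : Int) + k) = t[k]? := by
  exact_mod_cast PySem.List.pyGet?_append_right pre t k

lemma pvLookL (pre t : List Char) (hp : pre ≠ []) :
    PySem.List.pyGet? (pre ++ t) ((pre.length : Int) - 1) = pre.getLast? := by
  have hl : 0 < pre.length := List.length_pos_iff.mpr hp
  have h0 : (0:Int) ≤ (pre.length : Int) - 1 := by omega
  rw [PySem.List.pyGet?_of_nonneg _ h0]
  have : ((pre.length : Int) - 1).toNat = pre.length - 1 := by omega
  rw [this, List.getElem?_append_left (by omega), List.getLast?_eq_getElem?]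

lemma pvCnt_nonneg (t : List Char) : 0 ≤ pvCnt t := by
  induction t with
  | nil => simp [pvCnt]
  | cons c t ih => simp only [pvCnt]; split <;> omega

lemma pvPrs_nonneg (t : List Char) : 0 ≤ pvPrs t := by
  fun_induction pvPrs t
  all_goals simp_all [pvPrs]
  all_goals omega

lemma pvPrs_le (t : List Char) : 2 * pvPrs t ≤ pvCnt t := by
  fun_induction pvPrs t
  all_goals simp_all [pvCnt]
  all_goals try omega
  all_goals try exact pvCnt_nonneg _

lemma pvPrs_dot (t : List Char) : pvPrs ('.' :: t) = pvPrs t := by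
  match t with
  | [] => simp [pvPrs]
  | [d] => simp [pvPrs]
  | d :: e :: r => simp [pvPrs]

lemma pvPrs_snd {d : Char} (hd : d ≠ '.') (c : Char) (t : List Char) :
    pvPrs (c :: d :: t) = pvPrs (d :: t) := by
  match t with
  | [] => simp [pvPrs]
  | e :: r => simp [pvPrs, hd]

lemma pvAcc_comb (result v : Int) (h : -1 ≤ v) :
    pvAcc result (pvComb v) = pvAcc (result + 1) v := by
  unfold pvAcc pvComb
  by_cases hv : v = -1 <;> simp [hv] <;> omega

lemma pvAGo_dot {s : List Char} {n i : Int} {c : Char} {rest : List (Int × Char)} {last result : Int}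
    (hc : c = '.') :
    pvAGo s n ((i, c) :: rest) last result = pvAGo s n rest last result := by
  simp only [pvAGo, if_pos hc]

lemma pvAGo_skip {s : List Char} {n i : Int} {c : Char} {rest : List (Int × Char)} {last result : Int}
    (hc : ¬ c = '.') (h : 1 ≤ i ∧ last = i - 1) :
    pvAGo s n ((i, c) :: rest) last result = pvAGo s n rest last result := by
  simp only [pvAGo]; rw [if_neg hc, if_pos h]

lemma pvAGo_right {s : List Char} {n i : Int} {c : Char} {rest : List (Int × Char)} {last result : Int}
    (hc : ¬ c = '.') (h1 : ¬ (1 ≤ i ∧ last = i - 1))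
    (h2 : i < n - 1 ∧ PySem.List.pyGet? s (i + 1) = some '.') :
    pvAGo s n ((i, c) :: rest) last result = pvAGo s n rest (i + 1) (result + 1) := by
  simp only [pvAGo]; rw [if_neg hc, if_neg h1, if_pos h2]

lemma pvAGo_left {s : List Char} {n i : Int} {c : Char} {rest : List (Int × Char)} {last result : Int}
    (hc : ¬ c = '.') (h1 : ¬ (1 ≤ i ∧ last = i - 1))
    (h2 : ¬ (i < n - 1 ∧ PySem.List.pyGet? s (i + 1) = some '.'))
    (h3 : 1 ≤ i ∧ PySem.List.pyGet? s (i - 1) = some '.') :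
    pvAGo s n ((i, c) :: rest) last result = pvAGo s n rest (i - 1) (result + 1) := by
  simp only [pvAGo]; rw [if_neg hc, if_neg h1, if_neg h2, if_pos h3]

lemma pvAGo_fail {s : List Char} {n i : Int} {c : Char} {rest : List (Int × Char)} {last result : Int}
    (hc : ¬ c = '.') (h1 : ¬ (1 ≤ i ∧ last = i - 1))
    (h2 : ¬ (i < n - 1 ∧ PySem.List.pyGet? s (i + 1) = some '.'))
    (h3 : ¬ (1 ≤ i ∧ PySem.List.pyGet? s (i - 1) = some '.')) :
    pvAGo s n ((i, c) :: rest) last result = -1 := by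
  simp only [pvAGo]; rw [if_neg hc, if_neg h1, if_neg h2, if_neg h3]

lemma pvAGo_eq (N : Nat) : ∀ (t pre : List Char), t.length ≤ N → ∀ (last result : Int),
    last ≤ (pre.length : Int) - 2 →
    pvAGo (pre ++ t) ((pre ++ t).length : Int) (PySem.List.enumerate t (pre.length : Int)) last result
      = pvAcc result (pvF (decide (pre.getLast? = some '.')) t) := by
  induction N with
  | zero =>
    intro t pre hlen last result hlast
    have ht : t = [] := List.eq_nil_of_length_eq_zero (by omega)
    subst ht
    simp [PySem.List.enumerate, pvAGo, pvF, pvAcc]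
  | succ N ih =>
    intro t pre hlen last result hlast
    cases t with
    | nil => simp [PySem.List.enumerate, pvAGo, pvF, pvAcc]
    | cons c t1 =>
      rw [PySem.List.enumerate_cons]
      by_cases hc : c = '.'
      · rw [pvAGo_dot hc]
        subst hc
        have hs : pre ++ '.' :: t1 = (pre ++ ['.']) ++ t1 := by simp
        have hi : (pre.length : Int) + 1 = (((pre ++ ['.']).length : Int)) := by
          simp [List.length_append]
        rw [hs, hi, ih t1 (pre ++ ['.']) (by simpa using Nat.le_of_succ_le_succ hlen) last result
          (by simp [List.length_append]; push_cast; omega)]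
        have hx : pvF (decide (pre.getLast? = some '.')) ('.' :: t1) = pvF true t1 := by
          rw [pvF.eq_def]; simp
        rw [hx, List.getLast?_concat]
        simp
      · have hskip : ¬ (1 ≤ (pre.length : Int) ∧ last = (pre.length : Int) - 1) := by
          rintro ⟨-, h⟩; omega
        have hhead : PySem.List.pyGet? (pre ++ c :: t1) ((pre.length : Int) + 1) = t1.head? := by
          have h := pvLookR pre (c :: t1) 1
          simpa [List.head?_eq_getElem?] using h
        have hL : (1 ≤ (pre.length : Int) ∧
            PySem.List.pyGet? (pre ++ c :: t1) ((pre.length : Int) - 1) = some '.')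
              ↔ pre.getLast? = some '.' := by
          constructor
          · rintro ⟨hp1, hp2⟩
            have hp : pre ≠ [] := by intro h; subst h; simp at hp1
            rwa [pvLookL _ _ hp] at hp2
          · intro h
            have hp : pre ≠ [] := by intro hh; subst hh; simp at h
            have hl : 0 < pre.length := List.length_pos_iff.mpr hp
            exact ⟨by exact_mod_cast hl, by rwa [pvLookL _ _ hp]⟩
        by_cases h3 : t1.head? = some '.'
        · -- right neighbour is a dot: A places the bucket to the right
          cases t1 with
          | nil => simp at h3
          | cons d t2 =>
            have hd : d = '.' := by simpa using h3
            subst hd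
            rw [pvAGo_right hc hskip
              ⟨by simp [List.length_append]; push_cast; omega, by rw [hhead]; exact h3⟩]
            rw [PySem.List.enumerate_cons, pvAGo_dot rfl]
            cases t2 with
            | nil =>
              have hx : pvF (decide (pre.getLast? = some '.')) [c, '.'] = 1 := by
                rw [pvF.eq_def]; simp [hc]
              rw [hx]
              simp [PySem.List.enumerate, pvAGo, pvAcc]
            | cons e t3 =>
              rw [PySem.List.enumerate_cons]
              by_cases he : e = '.'
              · rw [pvAGo_dot he]
                subst he
                have hs : pre ++ c :: '.' :: '.' :: t3 = (pre ++ [c, '.', '.']) ++ t3 := by simp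
                have hi : (pre.length : Int) + 1 + 1 + 1 = (((pre ++ [c, '.', '.']).length : Int)) := by
                  simp [List.length_append]; push_cast; omega
                rw [hs, hi, ih t3 (pre ++ [c, '.', '.']) (by simp at hlen ⊢; omega)
                  ((pre.length : Int) + 1) (result + 1)
                  (by simp [List.length_append]; push_cast; omega)]
                have hfl : (pre ++ [c, '.', '.']).getLast? = some '.' := by
                  have h : pre ++ [c, '.', '.'] = (pre ++ [c, '.']) ++ ['.'] := by simp
                  rw [h, List.getLast?_concat]
                rw [hfl]
                have hRHS : pvF (decide (pre.getLast? = some '.')) (c :: '.' :: '.' :: t3)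
                    = pvComb (pvF true t3) := by rw [pvF.eq_def]; simp [hc]
                rw [hRHS, pvAcc_comb _ _ (pvF_ge _ _)]
                simp
              · rw [pvAGo_skip he ⟨by omega, by omega⟩]
                have hs : pre ++ c :: '.' :: e :: t3 = (pre ++ [c, '.', e]) ++ t3 := by simp
                have hi : (pre.length : Int) + 1 + 1 + 1 = (((pre ++ [c, '.', e]).length : Int)) := by
                  simp [List.length_append]; push_cast; omega
                rw [hs, hi, ih t3 (pre ++ [c, '.', e]) (by simp at hlen ⊢; omega)
                  ((pre.length : Int) + 1) (result + 1)
                  (by simp [List.length_append]; push_cast; omega)]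
                have hfl : (pre ++ [c, '.', e]).getLast? = some e := by
                  have h : pre ++ [c, '.', e] = (pre ++ [c, '.']) ++ [e] := by simp
                  rw [h, List.getLast?_concat]
                rw [hfl]
                have hRHS : pvF (decide (pre.getLast? = some '.')) (c :: '.' :: e :: t3)
                    = pvComb (pvF false t3) := by rw [pvF.eq_def]; simp [hc, he]
                rw [hRHS, pvAcc_comb _ _ (pvF_ge _ _)]
                simp [he]
        · -- no dot on the right
          have hnr : ¬ ((pre.length : Int) < ((pre ++ c :: t1).length : Int) - 1 ∧
              PySem.List.pyGet? (pre ++ c :: t1) ((pre.length : Int) + 1) = some '.') := by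
            rintro ⟨-, hp⟩; rw [hhead] at hp; exact h3 hp
          by_cases hl : pre.getLast? = some '.'
          · rw [pvAGo_left hc hskip hnr (hL.mpr hl)]
            have hs : pre ++ c :: t1 = (pre ++ [c]) ++ t1 := by simp
            have hi : (pre.length : Int) + 1 = (((pre ++ [c]).length : Int)) := by
              simp [List.length_append]
            rw [hs, hi, ih t1 (pre ++ [c]) (by simpa using Nat.le_of_succ_le_succ hlen)
              ((pre.length : Int) - 1) (result + 1)
              (by simp [List.length_append]; push_cast; omega)]
            rw [List.getLast?_concat]
            cases t1 with
            | nil =>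
              have hx : pvF (decide (pre.getLast? = some '.')) [c] = 1 := by
                rw [pvF.eq_def]; simp [hc, hl]
              rw [hx]
              simp [PySem.List.enumerate, pvF, pvAcc, pvComb, hc]
            | cons d t2 =>
              have hd : d ≠ '.' := by simpa using h3
              have hRHS : pvF (decide (pre.getLast? = some '.')) (c :: d :: t2)
                  = pvComb (pvF false (d :: t2)) := by rw [pvF.eq_def]; simp [hc, hd, hl]
              rw [hRHS, pvAcc_comb _ _ (pvF_ge _ _)]
              simp [hc]
          · rw [pvAGo_fail hc hskip hnr (fun hC => hl (hL.mp hC))]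
            have hfl : (decide (pre.getLast? = some '.')) = false := by simp [hl]
            cases t1 with
            | nil =>
              have hx : pvF (decide (pre.getLast? = some '.')) [c] = -1 := by
                rw [pvF.eq_def]; simp [hc, hl]
              rw [hx]
              simp [pvAcc]
            | cons d t2 =>
              have hd : d ≠ '.' := by simpa using h3
              have hRHS : pvF (decide (pre.getLast? = some '.')) (c :: d :: t2) = -1 := by
                rw [pvF.eq_def]; simp [hc, hd, hfl]
              rw [hRHS]
              simp [pvAcc]

lemma pvBCount_eq (t : List Char) : ∀ (pre : List Char) (total : Int),
    pvBCount (pre ++ t) (((pre ++ t).length : Int)) (PySem.List.enumerate t (pre.length : Int)) total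
      = if pvFeas (decide (pre.getLast? = some '.')) t then some (total + pvCnt t) else none := by
  induction t with
  | nil => intro pre total; simp [PySem.List.enumerate, pvBCount, pvFeas, pvCnt]
  | cons c t ih =>
    intro pre total
    rw [PySem.List.enumerate_cons]
    have h1 : pre ++ c :: t = (pre ++ [c]) ++ t := by simp
    have h2 : (pre.length : Int) + 1 = (((pre ++ [c]).length : Int)) := by
      simp [List.length_append]
    by_cases hc : c = '.'
    · subst hc
      simp only [pvBCount, ne_eq, not_true_eq_false, if_false, reduceIte]
      rw [h1, h2, ih (pre ++ ['.']) total]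
      simp [pvFeas, pvCnt, List.getLast?_concat]
    · have hhead : PySem.List.pyGet? (pre ++ c :: t) ((pre.length : Int) + 1) = t.head? := by
        have h := pvLookR pre (c :: t) 1
        simpa [List.head?_eq_getElem?] using h
      have hL : (0 < (pre.length : Int) ∧
          PySem.List.pyGet? (pre ++ c :: t) ((pre.length : Int) - 1) = some '.')
            ↔ pre.getLast? = some '.' := by
        constructor
        · rintro ⟨hp1, hp2⟩
          have hp : pre ≠ [] := by
            intro h; subst h; simp at hp1
          rwa [pvLookL _ _ hp] at hp2
        · intro h
          have hp : pre ≠ [] := by intro hh; subst hh; simp at h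
          have hl : 0 < pre.length := List.length_pos_iff.mpr hp
          exact ⟨by exact_mod_cast hl, by rwa [pvLookL _ _ hp]⟩
      have hR : ((pre.length : Int) < (((pre ++ c :: t).length : Int)) - 1 ∧
          PySem.List.pyGet? (pre ++ c :: t) ((pre.length : Int) + 1) = some '.')
            ↔ t.head? = some '.' := by
        constructor
        · rintro ⟨_, hp2⟩; rwa [hhead] at hp2
        · intro h
          refine ⟨?_, by rwa [hhead]⟩
          have ht : t ≠ [] := by intro hh; subst hh; simp at h
          have hl : 0 < t.length := List.length_pos_iff.mpr ht
          simp only [List.length_append, List.length_cons]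
          push_cast
          omega
      simp only [pvBCount, if_pos hc, ne_eq, hc, not_false_eq_true, if_true, reduceIte]
      by_cases hcond : pre.getLast? = some '.' ∨ t.head? = some '.'
      · rw [if_neg (by rw [hL, hR]; exact not_not_intro hcond)]
        rw [h1, h2, ih (pre ++ [c]) (total + 1)]
        have hflag : (((pre ++ [c]).getLast? = some '.')) = False := by
          simp [List.getLast?_concat, hc]
        have hfeas : pvFeas (decide (pre.getLast? = some '.')) (c :: t) = pvFeas false t := by
          rcases hcond with h | h <;> simp [pvFeas, hc, h]
        rw [hfeas]
        simp only [hflag, decide_false]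
        have hcnt : pvCnt (c :: t) = 1 + pvCnt t := by simp [pvCnt, hc]
        rw [hcnt]
        split <;> simp <;> omega
      · rw [if_pos (by rw [hL, hR]; exact hcond)]
        push_neg at hcond
        have hfeas : pvFeas (decide (pre.getLast? = some '.')) (c :: t) = false := by
          simp [pvFeas, hc, hcond.1, hcond.2]
        rw [hfeas]
        simp

lemma pvBPairs_eq (N : Nat) : ∀ (s : List Char) (i : Nat) (p : Int), s.length - i ≤ N →
    pvBPairs s i p = p + pvPrs (List.drop i s) := by
  induction N with
  | zero =>
    intro s i p h
    rw [pvBPairs]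
    have hg : ¬ (i + 2 < s.length) := by omega
    have hd : List.drop i s = [] := List.drop_eq_nil_of_le (by omega)
    simp [hg, hd, pvPrs]
  | succ N ih =>
    intro s i p h
    rw [pvBPairs]
    by_cases hg : i + 2 < s.length
    · have h0 : i < s.length := by omega
      have h1 : i + 1 < s.length := by omega
      have h3 : i + 2 + 1 = i + 3 := by omega
      have hd : List.drop i s = s[i] :: s[i+1] :: s[i+2] :: List.drop (i+3) s := by
        rw [List.drop_eq_getElem_cons h0, List.drop_eq_getElem_cons h1, List.drop_eq_getElem_cons hg, h3]
      rw [dif_pos hg]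
      by_cases hm : s[i] ≠ '.' ∧ s[i+1] = '.' ∧ s[i+2] ≠ '.'
      · rw [if_pos hm, ih s (i+3) (p+1) (by omega), hd]
        have : pvPrs (s[i] :: s[i+1] :: s[i+2] :: List.drop (i+3) s)
            = 1 + pvPrs (List.drop (i+3) s) := by
          simp only [pvPrs, if_pos hm]
        rw [this]
        omega
      · rw [if_neg hm, ih s (i+1) p (by omega), hd]
        have hd1 : List.drop (i+1) s = s[i+1] :: s[i+2] :: List.drop (i+3) s := by
          rw [List.drop_eq_getElem_cons h1, List.drop_eq_getElem_cons hg, h3]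
        rw [hd1]
        have : pvPrs (s[i] :: s[i+1] :: s[i+2] :: List.drop (i+3) s)
            = pvPrs (s[i+1] :: s[i+2] :: List.drop (i+3) s) := by
          simp only [pvPrs, if_neg hm]
        rw [this]
    · rw [dif_neg hg]
      have hlen : (List.drop i s).length ≤ 2 := by simp [List.length_drop]; omega
      match hm : List.drop i s with
      | [] => simp [pvPrs]
      | [a] => simp [pvPrs]
      | [a, b] => simp [pvPrs]
      | a :: b :: c :: r => rw [hm] at hlen; simp at hlen

lemma pvF_formula (b : Bool) (t : List Char) :
    pvF b t = if pvFeas b t then pvCnt t - pvPrs t else -1 := by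
  fun_induction pvF b t with
  | case1 b => simp [pvFeas, pvCnt, pvPrs]
  | case2 b t ih =>
    rw [ih]
    simp [pvFeas, pvCnt, pvPrs_dot]
  | case3 b c hc t'' ih =>
    have e1 : pvFeas b (c :: '.' :: '.' :: t'') = pvFeas true t'' := by simp [pvFeas]
    have e2 : pvCnt (c :: '.' :: '.' :: t'') = 1 + pvCnt t'' := by simp [pvCnt, hc]
    have e3 : pvPrs (c :: '.' :: '.' :: t'') = pvPrs t'' := by
      have : pvPrs (c :: '.' :: '.' :: t'') = pvPrs ('.' :: '.' :: t'') := by simp [pvPrs]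
      rw [this, pvPrs_dot, pvPrs_dot]
    rw [e1, e2, e3, ih]
    have l1 := pvPrs_le t''
    have l2 := pvPrs_nonneg t''
    by_cases hf : pvFeas true t'' = true <;> simp [hf, pvComb]
    rw [if_neg (by omega : ¬ pvCnt t'' - pvPrs t'' = -1)]
    omega
  | case4 b c hc e t'' he ih =>
    have e1 : pvFeas b (c :: '.' :: e :: t'') = pvFeas false t'' := by simp [pvFeas, he]
    have e2 : pvCnt (c :: '.' :: e :: t'') = 2 + pvCnt t'' := by
      simp [pvCnt, hc, he]; omega
    have e3 : pvPrs (c :: '.' :: e :: t'') = 1 + pvPrs t'' := by simp [pvPrs, hc, he]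
    rw [e1, e2, e3, ih]
    have l1 := pvPrs_le t''
    have l2 := pvPrs_nonneg t''
    by_cases hf : pvFeas false t'' = true <;> simp [hf, pvComb]
    rw [if_neg (by omega : ¬ pvCnt t'' - pvPrs t'' = -1)]
    omega
  | case5 b c hc => simp [pvFeas, pvCnt, pvPrs, hc]
  | case6 c hc e t'' he ih =>
    have e1 : pvFeas true (c :: e :: t'') = pvFeas false (e :: t'') := by simp [pvFeas, hc]
    have e2 : pvCnt (c :: e :: t'') = 1 + pvCnt (e :: t'') := by simp only [pvCnt, if_neg hc]
    have e3 : pvPrs (c :: e :: t'') = pvPrs (e :: t'') := pvPrs_snd he c t''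
    rw [e1, e2, e3, ih]
    have l1 := pvPrs_le (e :: t'')
    have l2 := pvPrs_nonneg (e :: t'')
    by_cases hf : pvFeas false (e :: t'') = true <;> simp [hf, pvComb]
    rw [if_neg (by omega : ¬ pvCnt (e :: t'') - pvPrs (e :: t'') = -1)]
    omega
  | case7 b c hc e t'' he hb =>
    have hb' : b = false := by simpa using hb
    subst hb'
    simp [pvFeas, hc, he]
  | case8 c hc => simp [pvFeas, pvCnt, pvPrs, hc]
  | case9 b c hc hb =>
    have hb' : b = false := by simpa using hb
    subst hb'
    simp [pvFeas, hc]

-- ===== VERDICT (by name: the statement is the Claim_ definition above) =====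
theorem minimumBuckets_spec : Claim_equal_minimumBuckets := by
  intro hamsters _
  unfold Spec_minimumBuckets minimumBuckets minimumBuckets_alt
  have hacc : ∀ v : Int, pvAcc 0 v = v := by intro v; unfold pvAcc; split <;> omega
  have hA := pvAGo_eq (hamsters.toList.length) hamsters.toList [] (le_refl _) (-2) 0 (by simp)
  have hB := pvBCount_eq hamsters.toList [] 0
  have hP := pvBPairs_eq (hamsters.toList.length) hamsters.toList 0 0 (by omega)
  have hF := pvF_formula false hamsters.toList
  simp only [List.nil_append, List.length_nil, Nat.cast_zero, List.getLast?_nil,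
    reduceCtorEq, decide_false] at hA hB
  rw [hA, hacc, hF, hB, hP]
  by_cases hf : pvFeas false hamsters.toList = true
  · simp only [hf, if_true]
    have l1 := pvPrs_le hamsters.toList
    have l2 := pvPrs_nonneg hamsters.toList
    simp only [List.drop_zero]
    omega
  · simp only [Bool.not_eq_true] at hf
    simp [hf]
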